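-- pv_equiv track=rewrite | github.com/EasyFree-Project/EasyFree-Backend | SERVER/EasyFree/predict_region.py | _feature_vector
-- ===== SOURCE A (Python) =====
-- def _feature_vector(key_terms, tokens):
--     feature_vec = []
--
--     for term in key_terms:
--         if term in tokens:
--             feature_vec.append(1)
--         else:
--             feature_vec.append(0)
--
--     return feature_vec
-- ===== SOURCE B (Python) =====
-- def _feature_vector(key_terms, tokens):
--     positions = {}
--     for i, term in enumerate(key_terms):
--         positions.setdefault(term, []).append(i)
--     feature_vec = [0] * len(key_terms)
--     for tok in tokens:
--         for i in positions.get(tok, ()):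
--             feature_vec[i] = 1
--     return feature_vec
-- ===== Notes on version B (the rewrite author's own statement) =====
-- stated objective: faster
-- what changed: Instead of scanning the whole tokens list once per key term, B builds a dict from each key term to its positions and does one hash-indexed pass over tokens scattering 1s into a pre-zeroed vector.
import Mathlib
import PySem

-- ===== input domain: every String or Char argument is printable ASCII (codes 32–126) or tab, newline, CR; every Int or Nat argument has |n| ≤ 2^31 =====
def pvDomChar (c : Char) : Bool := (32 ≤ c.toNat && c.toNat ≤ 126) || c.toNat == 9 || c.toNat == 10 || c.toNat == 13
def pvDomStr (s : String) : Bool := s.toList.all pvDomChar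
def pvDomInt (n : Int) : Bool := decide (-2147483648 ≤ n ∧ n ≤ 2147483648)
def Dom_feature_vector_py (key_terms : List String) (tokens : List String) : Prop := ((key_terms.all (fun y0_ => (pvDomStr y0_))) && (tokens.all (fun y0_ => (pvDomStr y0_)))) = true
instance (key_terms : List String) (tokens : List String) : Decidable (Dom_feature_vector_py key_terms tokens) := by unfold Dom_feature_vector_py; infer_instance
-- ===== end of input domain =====

-- B replaces A's per-term scan of tokens by a positions dict built once over key_terms and a single
-- scatter pass over tokens into a pre-zeroed vector (alternative decomposition, same result).


-- ===== PORT A =====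
-- for term in key_terms: append 1 if term in tokens else 0
def feature_vector_py (key_terms : List String) (tokens : List String) : List Int :=
  key_terms.foldl (fun feature_vec term =>
    if tokens.contains term then feature_vec ++ [1] else feature_vec ++ [0]) []

-- ===== PORT B =====
-- positions: dict term -> list of its indices in key_terms ('for i, term in enumerate(key_terms)'
-- ported via zipIdx; the index is a Nat because enumerate yields only nonnegative indices, so this is exact);
-- then feature_vec = [0]*len(key_terms), and one pass over tokens setting feature_vec[i] = 1
-- (each i is in range, so List.set is exactly Python's in-range assignment).
def feature_vector_py_alt (key_terms : List String) (tokens : List String) : List Int :=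
  let positions : PySem.Dict String (List Nat) :=
    key_terms.zipIdx.foldl (fun d p => d.modify p.1 [] (· ++ [p.2])) PySem.Dict.empty
  let feature_vec : List Int := List.replicate key_terms.length 0
  tokens.foldl (fun v tok => (positions.getD tok []).foldl (fun v i => v.set i 1) v) feature_vec

-- ===== PRECONDITION & SPEC =====
def Spec_feature_vector_py (key_terms : List String) (tokens : List String) (out : List Int) : Prop := out = feature_vector_py_alt key_terms tokens
instance (key_terms : List String) (tokens : List String) (out : List Int) : Decidable (Spec_feature_vector_py key_terms tokens out) := by unfold Spec_feature_vector_py; infer_instance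

-- ===== CLAIM (what is proved, stated in full; the proofs are below) =====
def Claim_equal_feature_vector_py : Prop := ∀ (key_terms : List String) (tokens : List String), Dom_feature_vector_py key_terms tokens → Spec_feature_vector_py key_terms tokens (feature_vector_py key_terms tokens)

-- ===== LEMMAS AND PROOFS =====

-- A's appending loop is a map.
theorem featA_eq_map (key_terms tokens : List String) :
    feature_vector_py key_terms tokens
      = key_terms.map (fun term => if tokens.contains term then (1 : Int) else 0) := by
  unfold feature_vector_py
  suffices h : ∀ (l : List String) (acc : List Int),
      l.foldl (fun fv term => if tokens.contains term then fv ++ [1] else fv ++ [0]) acc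
        = acc ++ l.map (fun term => if tokens.contains term then (1 : Int) else 0) by
    simpa using h key_terms []
  intro l
  induction l with
  | nil => simp
  | cons x xs ih =>
    intro acc
    rw [List.foldl_cons, ih, List.map_cons]
    by_cases h : x ∈ tokens <;> simp [h]

-- Membership in the positions dict characterises "key_terms[i] = t".
theorem mem_positions (key_terms : List String) (t : String) (i : Nat) :
    i ∈ (key_terms.zipIdx.foldl (fun d p => d.modify p.1 [] (· ++ [p.2]))
          (PySem.Dict.empty : PySem.Dict String (List Nat))).getD t []
      ↔ key_terms[i]? = some t := by
  rw [PySem.Dict.getD_foldl_modify_append]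
  simp only [PySem.Dict.getD_empty, List.nil_append, List.mem_map, List.mem_filter]
  constructor
  · rintro ⟨⟨a, j⟩, ⟨hmem, heq⟩, rfl⟩
    simp only [beq_iff_eq] at heq
    subst heq
    exact List.mem_zipIdx_iff_getElem?.mp hmem
  · intro h
    exact ⟨(t, i), ⟨List.mem_zipIdx_iff_getElem?.mpr h, by simp⟩, rfl⟩

-- Setting index x to 1 does not change an entry read through a constant-1 map.
theorem map_one_set (v : List Int) (x j : Nat) :
    ((v.set x (1 : Int))[j]?).map (fun _ => (1 : Int)) = (v[j]?).map (fun _ => (1 : Int)) := by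
  rw [List.getElem?_set]
  split_ifs with h1 h2
  · subst h1
    simp [h2]
  · subst h1
    simp [List.getElem?_eq_none_iff.mpr (Nat.le_of_not_lt h2)]
  · rfl

-- The inner scatter loop, entrywise.
theorem inner_scatter (is : List Nat) (v : List Int) (j : Nat) :
    (is.foldl (fun v i => v.set i (1 : Int)) v)[j]?
      = if j ∈ is then v[j]?.map (fun _ => (1 : Int)) else v[j]? := by
  induction is generalizing v with
  | nil => simp
  | cons x xs ih =>
    rw [List.foldl_cons, ih]
    by_cases hx : j ∈ xs
    · rw [if_pos hx, if_pos (List.mem_cons.mpr (Or.inr hx)), map_one_set]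
    · rw [if_neg hx]
      by_cases hj : j = x
      · subst hj
        rw [if_pos (List.mem_cons.mpr (Or.inl rfl)), List.getElem?_set, if_pos rfl]
        by_cases h : j < v.length
        · simp [h]
        · rw [if_neg h, List.getElem?_eq_none_iff.mpr (Nat.le_of_not_lt h)]
          rfl
      · rw [if_neg (by simp [hj, hx]), List.getElem?_set, if_neg (fun hh => hj hh.symm)]

-- The outer scatter loop, entrywise.
theorem outer_scatter (tokens : List String) (g : String → List Nat) (v : List Int) (j : Nat) :
    (tokens.foldl (fun v tok => (g tok).foldl (fun v i => v.set i (1 : Int)) v) v)[j]?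
      = if ∃ tok ∈ tokens, j ∈ g tok then v[j]?.map (fun _ => (1 : Int)) else v[j]? := by
  induction tokens generalizing v with
  | nil => simp
  | cons x xs ih =>
    rw [List.foldl_cons, ih, inner_scatter]
    by_cases h1 : j ∈ g x
    · rw [if_pos (show ∃ tok ∈ x :: xs, j ∈ g tok from ⟨x, by simp, h1⟩)]
      by_cases h2 : ∃ tok ∈ xs, j ∈ g tok
      · rw [if_pos h2]
        cases v[j]? <;> simp [h1]
      · rw [if_neg h2, if_pos h1]
    · rw [if_neg h1]
      by_cases h2 : ∃ tok ∈ xs, j ∈ g tok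
      · obtain ⟨t, ht, hjt⟩ := h2
        rw [if_pos (show ∃ tok ∈ xs, j ∈ g tok from ⟨t, ht, hjt⟩),
          if_pos (show ∃ tok ∈ x :: xs, j ∈ g tok from ⟨t, by simp [ht], hjt⟩)]
      · rw [if_neg h2, if_neg]
        rintro ⟨t, ht, hjt⟩
        rcases List.mem_cons.mp ht with rfl | ht'
        · exact h1 hjt
        · exact h2 ⟨t, ht', hjt⟩

theorem featB_getElem? (key_terms tokens : List String) (j : Nat) :
    (feature_vector_py_alt key_terms tokens)[j]?
      = if h : j < key_terms.length then
          some (if tokens.contains key_terms[j] then (1 : Int) else 0)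
        else none := by
  unfold feature_vector_py_alt
  rw [outer_scatter]
  by_cases hj : j < key_terms.length
  · have hrep : (List.replicate key_terms.length (0 : Int))[j]? = some 0 :=
      List.getElem?_eq_some_iff.mpr ⟨by simpa using hj, List.getElem_replicate ..⟩
    by_cases hc : tokens.contains key_terms[j]
    · have hmem : key_terms[j]'hj ∈ tokens := by simpa using hc
      have hex : ∃ tok ∈ tokens, j ∈ (key_terms.zipIdx.foldl
            (fun d p => d.modify p.1 [] (· ++ [p.2]))
            (PySem.Dict.empty : PySem.Dict String (List Nat))).getD tok [] :=
        ⟨key_terms[j]'hj, hmem,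
          (mem_positions key_terms _ j).mpr (List.getElem?_eq_some_iff.mpr ⟨hj, rfl⟩)⟩
      rw [if_pos hex, hrep, dif_pos hj, if_pos hc]
      rfl
    · have hex : ¬ ∃ tok ∈ tokens, j ∈ (key_terms.zipIdx.foldl
          (fun d p => d.modify p.1 [] (· ++ [p.2]))
          (PySem.Dict.empty : PySem.Dict String (List Nat))).getD tok [] := by
        rintro ⟨t, ht, hjt⟩
        have h' := (mem_positions key_terms t j).mp hjt
        have hv : key_terms[j] = t := (List.getElem?_eq_some_iff.mp h').2
        exact hc (by simpa [hv] using List.contains_iff_mem.mpr ht)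
      rw [if_neg hex, hrep, dif_pos hj, if_neg hc]
  · have hrep : (List.replicate key_terms.length (0 : Int))[j]? = none :=
      List.getElem?_eq_none_iff.mpr (by simpa using Nat.le_of_not_lt hj)
    rw [dif_neg hj]
    split_ifs <;> simp [hrep]

-- ===== VERDICT (by name: the statement is the Claim_ definition above) =====
theorem feature_vector_py_spec : Claim_equal_feature_vector_py := by
  intro key_terms tokens _
  unfold Spec_feature_vector_py
  apply List.ext_getElem?
  intro j
  rw [featA_eq_map, featB_getElem?]
  by_cases hj : j < key_terms.length
  · simp [hj]
  · simp [hj]
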